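-- pv_equiv track=rewrite | github.com/lyujiajie/ESE5023_Assignments_12331300 | PS1_4.py | Least_moves
-- ===== SOURCE A (Python) =====
-- import math
--
-- def Least_moves(y):
--     for i in range(2,100):
--         z=math.pow(2, i)
--         if y>z:
--             i=i+1
--         else:
--             break
--     s=y-(2**(i-1))+(i-1)
--     return s
-- ===== SOURCE B (Python) =====
-- def Least_moves(y):
--     # Closed form: i is the smallest exponent >= 2 with y <= 2**i (bit_length
--     # of y-1 gives it exactly for y >= 5; smaller y clamp to i = 2).
--     i = 2 if y <= 4 else (y - 1).bit_length()
--     return y - 2 ** (i - 1) + (i - 1)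
-- ===== Notes on version B (the rewrite author's own statement) =====
-- stated objective: idiomatic
-- what changed: Replaces the range(2,100) scan over float powers math.pow(2,i) with a closed-form exponent: i = 2 for y <= 4, else (y-1).bit_length(), then the same final formula.
import Mathlib
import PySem

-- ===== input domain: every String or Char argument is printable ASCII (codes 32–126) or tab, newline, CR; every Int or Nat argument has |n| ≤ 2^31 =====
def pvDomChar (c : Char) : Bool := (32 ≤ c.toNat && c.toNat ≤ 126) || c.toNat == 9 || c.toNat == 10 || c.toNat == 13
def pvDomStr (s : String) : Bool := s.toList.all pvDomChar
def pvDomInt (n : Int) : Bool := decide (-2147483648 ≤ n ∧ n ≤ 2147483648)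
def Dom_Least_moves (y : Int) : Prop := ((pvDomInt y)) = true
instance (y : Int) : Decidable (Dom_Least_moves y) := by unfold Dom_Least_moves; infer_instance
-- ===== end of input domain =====

-- B computes the loop's exponent in closed form with bit_length instead of scanning
-- range(2,100) against float powers; same final formula, same value on the domain.

-- ===== PORT A =====
-- loop body of A: state = (broken, i); math.pow(2,i) is exact for 2 ≤ i < 100, ported as 2^i
def pvStepA (y : Int) (st : Bool × Int) (j : Int) : Bool × Int :=
  if st.1 then st
  else
    let z : Int := 2 ^ j.toNat
    if y > z then (false, j + 1) else (true, j)

def Least_moves (y : Int) : Int :=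
  let st := (PySem.List.pyRange 2 100 1).foldl (pvStepA y) (false, 0)
  let i := st.2
  y - 2 ^ (i - 1).toNat + (i - 1)

-- ===== PORT B =====
-- (y-1).bit_length() for y ≥ 5 is Nat.log2 (y-1) + 1
def Least_moves_alt (y : Int) : Int :=
  let i : Int := if y ≤ 4 then 2 else ((Nat.log2 ((y - 1).toNat) + 1 : Nat) : Int)
  y - 2 ^ (i - 1).toNat + (i - 1)

-- ===== PRECONDITION & SPEC =====
def Spec_Least_moves (y : Int) (out : Int) : Prop := out = Least_moves_alt y
instance (y : Int) (out : Int) : Decidable (Spec_Least_moves y out) := by unfold Spec_Least_moves; infer_instance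

-- ===== CLAIM (what is proved, stated in full; the proofs are below) =====
def Claim_equal_Least_moves : Prop := ∀ (y : Int), Dom_Least_moves y → Spec_Least_moves y (Least_moves y)

-- ===== LEMMAS AND PROOFS =====

theorem pv_foldl_broken (y i : Int) (L : List Int) :
    L.foldl (pvStepA y) (true, i) = (true, i) := by
  induction L with
  | nil => rfl
  | cons a L ih => simpa [pvStepA] using ih

theorem pv_foldl_skip (y : Int) (L : List Int)
    (hL : ∀ j ∈ L, (2 : Int) ^ j.toNat < y) (s : Int) :
    ∃ t, L.foldl (pvStepA y) (false, s) = (false, t) := by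
  induction L generalizing s with
  | nil => exact ⟨s, rfl⟩
  | cons a L ih =>
    have ha : (2 : Int) ^ a.toNat < y := hL a (List.mem_cons_self)
    simp only [List.foldl_cons, pvStepA, if_neg (by simp : ¬ (false = true))]
    rw [if_pos ha]
    exact ih (fun j hj => hL j (List.mem_cons_of_mem a hj)) (a + 1)

theorem pv_foldl_main (y i : Int) (h2 : 2 ≤ i) (h100 : i < 100)
    (hbr : y ≤ 2 ^ i.toNat)
    (hsk : ∀ j, 2 ≤ j → j < i → (2 : Int) ^ j.toNat < y) :
    (PySem.List.pyRange 2 100 1).foldl (pvStepA y) (false, 0) = (true, i) := by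
  rw [PySem.List.pyRange_one_append 2 i 100 h2 (le_of_lt h100), List.foldl_append]
  obtain ⟨t, ht⟩ := pv_foldl_skip y (PySem.List.pyRange 2 i 1)
    (fun j hj => by
      rw [PySem.List.mem_pyRange_one] at hj
      exact hsk j hj.1 hj.2) 0
  rw [ht, PySem.List.pyRange_one_cons h100, List.foldl_cons]
  have hstep : pvStepA y (false, t) i = (true, i) := by
    simp [pvStepA, not_lt.mpr hbr]
  rw [hstep, pv_foldl_broken]

-- facts about B's closed-form exponent
theorem pv_i0_facts (y : Int) (hy : y ≤ 2147483648) :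
    2 ≤ (if y ≤ 4 then 2 else ((Nat.log2 ((y - 1).toNat) + 1 : Nat) : Int)) ∧
    (if y ≤ 4 then 2 else ((Nat.log2 ((y - 1).toNat) + 1 : Nat) : Int)) < 100 ∧
    y ≤ 2 ^ (if y ≤ 4 then 2 else ((Nat.log2 ((y - 1).toNat) + 1 : Nat) : Int)).toNat ∧
    ∀ j, 2 ≤ j → j < (if y ≤ 4 then 2 else ((Nat.log2 ((y - 1).toNat) + 1 : Nat) : Int)) →
      (2 : Int) ^ j.toNat < y := by
  by_cases h4 : y ≤ 4
  · simp only [if_pos h4]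
    refine ⟨le_refl _, by norm_num, ?_, ?_⟩
    · have h : (2 : Int) ^ ((2 : Int)).toNat = 4 := by decide
      rw [h]; omega
    · intro j hj2 hjlt; omega
  · push_neg at h4
    simp only [if_neg (not_le.mpr h4)]
    set m : Nat := (y - 1).toNat with hm
    have hmy : (m : Int) = y - 1 := by omega
    have hm0 : m ≠ 0 := by omega
    set k : Nat := Nat.log2 m with hk
    have hlo : 2 ^ k ≤ m := Nat.log2_self_le hm0
    have hhi : m < 2 ^ (k + 1) := Nat.lt_log2_self
    have hk31 : k ≤ 31 := by
      by_contra hc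
      push_neg at hc
      have : (2 : Nat) ^ 32 ≤ 2 ^ k := Nat.pow_le_pow_right (by norm_num) hc
      have hm31 : m ≤ 2 ^ 31 := by omega
      have := le_trans this hlo
      norm_num at this
      omega
    have hm4 : 4 ≤ m := by omega
    have hk2 : 2 ≤ k := by
      by_contra hc
      push_neg at hc
      have hle : (2 : Nat) ^ (k + 1) ≤ 2 ^ 2 := Nat.pow_le_pow_right (by norm_num) (by omega)
      have := lt_of_lt_of_le hhi hle
      omega
    refine ⟨by push_cast; omega, by push_cast; omega, ?_, ?_⟩
    · have hcast : (m : Int) < (2 : Int) ^ (k + 1) := by exact_mod_cast hhi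
      have ht : (((k + 1 : Nat) : Int)).toNat = k + 1 := by omega
      rw [ht]
      have hym : y = (m : Int) + 1 := by omega
      rw [hym]
      exact Int.add_one_le_of_lt hcast
    · intro j hj2 hjlt
      have hjk : j.toNat ≤ k := by omega
      have h1 : (2 : Nat) ^ j.toNat ≤ 2 ^ k := Nat.pow_le_pow_right (by norm_num) hjk
      have h2 : (2 : Int) ^ j.toNat ≤ (2 : Int) ^ k := by exact_mod_cast h1
      have h3 : ((2 : Nat) ^ k : Int) ≤ (m : Int) := by exact_mod_cast hlo
      push_cast at h3
      omega

-- ===== VERDICT (by name: the statement is the Claim_ definition above) =====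
theorem Least_moves_spec : Claim_equal_Least_moves := by
  intro y hdom
  unfold Spec_Least_moves Least_moves Least_moves_alt
  have hy : y ≤ 2147483648 := by
    simp only [Dom_Least_moves, pvDomInt, decide_eq_true_eq] at hdom
    exact hdom.2
  obtain ⟨h2, h100, hbr, hsk⟩ := pv_i0_facts y hy
  rw [pv_foldl_main y _ h2 h100 hbr hsk]
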